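-- pv_equiv track=rewrite | github.com/xorrosive/epicgames-free-checker | script.py | pick_best_image
-- ===== SOURCE A (Python) =====
-- def pick_best_image(key_images: list) -> str | None:
--     """Choose the best-looking image by type priority."""
--     if not key_images:
--         return None
--     prio = [
--         "OfferImageTall",
--         "DieselStoreFrontTall",
--         "VaultClosed",
--         "DieselStoreFrontWide",
--         "OfferImageWide",
--         "Thumbnail",
--     ]
--     by_type = {img.get("type"): img.get("url") for img in key_images if img.get("url")}
--     for t in prio:
--         if t in by_type:
--             return by_type[t]
--     return key_images[0].get("url")
-- ===== SOURCE B (Python) =====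
-- def pick_best_image(key_images: list) -> str | None:
--     """Choose the best-looking image by type priority."""
--     if not key_images:
--         return None
--     prio = [
--         "OfferImageTall",
--         "DieselStoreFrontTall",
--         "VaultClosed",
--         "DieselStoreFrontWide",
--         "OfferImageWide",
--         "Thumbnail",
--     ]
--     best_rank = len(prio)
--     best_url = None
--     for img in key_images:
--         url = img.get("url")
--         if not url:
--             continue
--         t = img.get("type")
--         if t in prio:
--             r = prio.index(t)
--             if r < best_rank:
--                 best_rank = r
--                 best_url = url
--     if best_url is not None:
--         return best_url
--     return key_images[0].get("url")
-- ===== Notes on version B (the rewrite author's own statement) =====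
-- stated objective: idiomatic
-- what changed: Replaces A's two-stage dict index (build type->url, then probe it in priority order) by a single pass over key_images keeping the url of the image with the lowest priority rank seen so far; Pre_ excludes lists in which two images with truthy urls share the same priority type but have different urls, where A's value comes from the dict comprehension's accidental last-wins overwrite.
import Mathlib
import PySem

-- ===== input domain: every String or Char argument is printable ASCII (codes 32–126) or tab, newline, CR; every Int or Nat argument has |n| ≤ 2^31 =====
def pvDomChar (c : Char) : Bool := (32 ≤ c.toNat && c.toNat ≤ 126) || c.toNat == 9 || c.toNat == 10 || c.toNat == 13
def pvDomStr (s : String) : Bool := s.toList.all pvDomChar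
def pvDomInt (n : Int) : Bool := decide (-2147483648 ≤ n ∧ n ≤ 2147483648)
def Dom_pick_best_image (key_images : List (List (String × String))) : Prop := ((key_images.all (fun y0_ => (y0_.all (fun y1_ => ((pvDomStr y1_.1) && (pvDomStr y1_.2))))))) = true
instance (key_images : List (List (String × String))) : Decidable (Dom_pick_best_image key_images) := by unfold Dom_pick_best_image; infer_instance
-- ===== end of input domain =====

-- B replaces A's two-stage dict index by a single ranking pass over key_images
-- (objective: idiomatic); Pre_ excludes lists on which A's dict last-wins
-- overwrite on duplicate priority types is accidental.

-- img.get(k): first match in the association list (Python dict lookup)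
def pbiGet (img : List (String × String)) (k : String) : Option String :=
  (img.find? (fun p => p.1 == k)).map (·.2)

def pbiPrio : List String :=
  ["OfferImageTall", "DieselStoreFrontTall", "VaultClosed",
   "DieselStoreFrontWide", "OfferImageWide", "Thumbnail"]

-- ===== PORT A =====
-- the dict comprehension: {img.get("type"): img.get("url") for img in key_images if img.get("url")}
def pbiByType (key_images : List (List (String × String))) : PySem.Dict (Option String) String :=
  key_images.foldl (fun d img =>
    match pbiGet img "url" with
    | some u => if u = "" then d else d.insert (pbiGet img "type") u
    | none => d) PySem.Dict.empty

-- the 'for t in prio: if t in by_type: return by_type[t]' loop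
def pbiFind (d : PySem.Dict (Option String) String) : List String → Option String
  | [] => none
  | t :: ts =>
    match d.get? (some t) with
    | some u => some u
    | none => pbiFind d ts

def pick_best_image (key_images : List (List (String × String))) : Option String :=
  if key_images = [] then none
  else
    match pbiFind (pbiByType key_images) pbiPrio with
    | some u => some u
    | none => pbiGet (key_images.headD []) "url"

-- ===== PORT B =====
-- single pass: keep (best_rank, best_url); 'if t in prio: r = prio.index(t)' is index?
def pick_best_image_alt (key_images : List (List (String × String))) : Option String :=
  match key_images with
  | [] => none
  | img0 :: _ =>
    let st : Nat × Option String :=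
      key_images.foldl (fun s img =>
        match pbiGet img "url" with
        | none => s
        | some u =>
          if u = "" then s
          else
            match pbiGet img "type" with
            | none => s
            | some t =>
              match PySem.List.index? pbiPrio t with
              | none => s
              | some r => if r < s.1 then (r, some u) else s)
        (pbiPrio.length, none)
    match st.2 with
    | some u => some u
    | none => pbiGet img0 "url"

-- ===== PRECONDITION & SPEC =====
-- the (priority type, truthy url) key of an image, if it has one
def pbiKey (img : List (String × String)) : Option (String × String) :=
  match pbiGet img "type", pbiGet img "url" with
  | some t, some u => if t ∈ pbiPrio ∧ u ≠ "" then some (t, u) else none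
  | _, _ => none

-- Pre_ excludes lists in which two images with truthy urls share the same priority
-- type but carry different urls: there A returns the LAST such url only because the
-- dict comprehension's overwrite on duplicate keys is last-wins, an accident of A's
-- implementation; B returns the first.
def Pre_pick_best_image (key_images : List (List (String × String))) : Prop :=
  (key_images.all (fun a => key_images.all (fun b =>
    match pbiKey a, pbiKey b with
    | some (t, u), some (t', u') => t != t' || u == u'
    | _, _ => true))) = true
instance (key_images : List (List (String × String))) : Decidable (Pre_pick_best_image key_images) := by unfold Pre_pick_best_image; infer_instance

def pvWitness_pick_best_image : (List (List (String × String))) :=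
  [[("type", "Thumbnail"), ("url", "x")], [("type", "OfferImageTall"), ("url", "y")]]

def Spec_pick_best_image (key_images : List (List (String × String))) (out : Option String) : Prop := out = pick_best_image_alt key_images
instance (key_images : List (List (String × String))) (out : Option String) : Decidable (Spec_pick_best_image key_images out) := by unfold Spec_pick_best_image; infer_instance

-- ===== CLAIM (what is proved, stated in full; the proofs are below) =====
def Claim_equal_pick_best_image : Prop := ∀ (key_images : List (List (String × String))), Dom_pick_best_image key_images → Pre_pick_best_image key_images → Spec_pick_best_image key_images (pick_best_image key_images)

-- ===== LEMMAS AND PROOFS =====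

-- a lookup in the dict built by A's comprehension is the last-wins by-type scan
theorem pbi_get_byType (t : String) :
    ∀ (imgs : List (List (String × String))) (d : PySem.Dict (Option String) String),
      (imgs.foldl (fun d img =>
        match pbiGet img "url" with
        | some u => if u = "" then d else d.insert (pbiGet img "type") u
        | none => d) d).get? (some t)
      = imgs.foldl (fun best img =>
          match pbiGet img "url" with
          | some u => if pbiGet img "type" = some t ∧ u ≠ "" then some u else best
          | none => best) (d.get? (some t)) := by
  intro imgs
  induction imgs with
  | nil => intro d; rfl
  | cons img rest ih =>
    intro d
    simp only [List.foldl_cons]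
    rw [ih]
    congr 1
    cases h : pbiGet img "url" with
    | none => simp
    | some u =>
      simp only
      by_cases hu : u = ""
      · simp [hu]
      · simp only [if_neg hu]
        rw [PySem.Dict.get?_insert]
        by_cases ht : pbiGet img "type" = some t
        · simp [ht, hu]
        · have : ¬ (some t = pbiGet img "type") := fun h' => ht h'.symm
          simp [ht, this, hu]



-- truthy url, and the priority rank of an image (6 = no priority type)
def pbiTruthy (img : List (String × String)) : Bool :=
  match pbiGet img "url" with
  | some u => u != ""
  | none => false

def pbiRank (img : List (String × String)) : Nat :=
  match pbiGet img "type" with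
  | some t =>
    match PySem.List.index? pbiPrio t with
    | some r => r
    | none => 6
  | none => 6

-- LAST truthy image of rank k (what A's dict holds), as a fold like the comprehension
def pbiLastR (key_images : List (List (String × String))) (k : Nat) : Option String :=
  key_images.foldl (fun best img =>
    if pbiTruthy img = true ∧ pbiRank img = k then pbiGet img "url" else best) none

-- FIRST truthy image of rank k (what B keeps)
def pbiFirstR : List (List (String × String)) → Nat → Option String
  | [], _ => none
  | img :: rest, k =>
    if pbiTruthy img = true ∧ pbiRank img = k then pbiGet img "url" else pbiFirstR rest k

-- minimum truthy rank, capped at hi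
def pbiMr (key_images : List (List (String × String))) (hi : Nat) : Nat :=
  key_images.foldl (fun m img => if pbiTruthy img then min m (pbiRank img) else m) hi

def pbiExR (key_images : List (List (String × String))) (k : Nat) : Prop :=
  ∃ img ∈ key_images, pbiTruthy img = true ∧ pbiRank img = k

theorem pbiTruthy_url (img : List (String × String)) (h : pbiTruthy img = true) :
    ∃ u, pbiGet img "url" = some u ∧ u ≠ "" := by
  unfold pbiTruthy at h
  cases hu : pbiGet img "url" with
  | none => rw [hu] at h; exact absurd h (by simp)
  | some u => exact ⟨u, rfl, by rw [hu] at h; simpa using h⟩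

theorem pbiMem_getD (k : Nat) (hk : k < 6) : pbiPrio.getD k "" ∈ pbiPrio := by
  interval_cases k <;> decide

theorem pbiRank_lt_iff (img : List (String × String)) (k : Nat) (hk : k < 6) :
    (pbiRank img = k) ↔ pbiGet img "type" = some (pbiPrio.getD k "") := by
  unfold pbiRank
  cases htype : pbiGet img "type" with
  | none => simp; omega
  | some t =>
    simp only [Option.some.injEq]
    cases h : PySem.List.index? pbiPrio t with
    | none =>
      have hnm : t ∉ pbiPrio := (PySem.List.index?_eq_none_iff _ _).1 h
      simp only
      constructor
      · omega
      · intro ht; exact absurd (ht ▸ pbiMem_getD k hk) hnm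
    | some r =>
      obtain ⟨hr, hget, _⟩ := PySem.List.getElem_of_index?_eq_some h
      simp only
      constructor
      · rintro rfl
        rw [List.getD_eq_getElem _ _ (by simpa using hk)]
        exact hget.symm
      · intro ht
        have hk' : pbiPrio[k]'(by simpa using hk) = t := by
          rw [List.getD_eq_getElem _ _ (by simpa using hk)] at ht; exact ht.symm
        have hnd : pbiPrio.Nodup := by decide
        exact hnd.getElem_inj_iff.1 (by rw [hget, hk'])

theorem pbiMr_le (L : List (List (String × String))) : ∀ hi, pbiMr L hi ≤ hi := by
  induction L with
  | nil => intro hi; exact le_rfl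
  | cons img rest ih =>
    intro hi
    show pbiMr rest (if pbiTruthy img then min hi (pbiRank img) else hi) ≤ hi
    refine le_trans (ih _) ?_
    split <;> simp

theorem pbiMr_attained (L : List (List (String × String))) :
    ∀ hi, pbiMr L hi < hi → pbiExR L (pbiMr L hi) := by
  induction L with
  | nil => intro hi h; exact absurd h (by simp [pbiMr])
  | cons img rest ih =>
    intro hi h
    by_cases ht : pbiTruthy img = true
    · have hstep : pbiMr (img :: rest) hi = pbiMr rest (min hi (pbiRank img)) := by
        simp [pbiMr, List.foldl_cons, ht]
      rw [hstep] at h ⊢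
      by_cases hlt : pbiMr rest (min hi (pbiRank img)) < min hi (pbiRank img)
      · obtain ⟨i, hi1, hi2⟩ := ih _ hlt
        exact ⟨i, List.mem_cons_of_mem _ hi1, hi2⟩
      · have heq : pbiMr rest (min hi (pbiRank img)) = min hi (pbiRank img) :=
          le_antisymm (pbiMr_le _ _) (le_of_not_gt hlt)
        have hmin : min hi (pbiRank img) = pbiRank img := by
          rw [heq] at h; omega
        exact ⟨img, List.mem_cons_self, ht, by rw [heq, hmin]⟩
    · have hstep : pbiMr (img :: rest) hi = pbiMr rest hi := by
        simp [pbiMr, List.foldl_cons, ht]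
      rw [hstep] at h ⊢
      obtain ⟨i, hi1, hi2⟩ := ih _ h
      exact ⟨i, List.mem_cons_of_mem _ hi1, hi2⟩

theorem pbiMr_lb (L : List (List (String × String))) :
    ∀ hi, ∀ img ∈ L, pbiTruthy img = true → pbiMr L hi ≤ pbiRank img := by
  induction L with
  | nil => intro _ _ h; exact absurd h (by simp)
  | cons i rest ih =>
    intro hi img hmem htr
    rcases List.mem_cons.1 hmem with rfl | hmem'
    · have hstep : pbiMr (img :: rest) hi = pbiMr rest (min hi (pbiRank img)) := by
        simp [pbiMr, List.foldl_cons, htr]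
      rw [hstep]
      exact le_trans (pbiMr_le _ _) (min_le_right _ _)
    · show pbiMr rest _ ≤ _
      exact ih _ img hmem' htr

theorem pbiLastR_aux (k : Nat) (L : List (List (String × String))) :
    ∀ acc, (¬ pbiExR L k ∧ L.foldl (fun best img =>
        if pbiTruthy img = true ∧ pbiRank img = k then pbiGet img "url" else best) acc = acc)
      ∨ (∃ img ∈ L, pbiTruthy img = true ∧ pbiRank img = k ∧
          L.foldl (fun best img =>
            if pbiTruthy img = true ∧ pbiRank img = k then pbiGet img "url" else best) acc
          = pbiGet img "url") := by
  induction L with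
  | nil => intro acc; exact Or.inl ⟨by simp [pbiExR], rfl⟩
  | cons i rest ih =>
    intro acc
    by_cases hc : pbiTruthy i = true ∧ pbiRank i = k
    · rcases ih (pbiGet i "url") with ⟨hnex, heq⟩ | ⟨img, hm, h1, h2, h3⟩
      · refine Or.inr ⟨i, List.mem_cons_self, hc.1, hc.2, ?_⟩
        simpa [List.foldl_cons, hc] using heq
      · refine Or.inr ⟨img, List.mem_cons_of_mem _ hm, h1, h2, ?_⟩
        simpa [List.foldl_cons, hc] using h3
    · rcases ih acc with ⟨hnex, heq⟩ | ⟨img, hm, h1, h2, h3⟩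
      · refine Or.inl ⟨?_, by simpa [List.foldl_cons, hc] using heq⟩
        rintro ⟨img, hm, h1, h2⟩
        rcases List.mem_cons.1 hm with rfl | hm'
        · exact hc ⟨h1, h2⟩
        · exact hnex ⟨img, hm', h1, h2⟩
      · refine Or.inr ⟨img, List.mem_cons_of_mem _ hm, h1, h2, ?_⟩
        simpa [List.foldl_cons, hc] using h3

theorem pbiLastR_none_iff (L : List (List (String × String))) (k : Nat) :
    pbiLastR L k = none ↔ ¬ pbiExR L k := by
  constructor
  · intro h hex
    rcases pbiLastR_aux k L none with ⟨hnex, _⟩ | ⟨img, _, h1, _, h3⟩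
    · exact hnex hex
    · obtain ⟨u, hu, _⟩ := pbiTruthy_url img h1
      rw [pbiLastR] at h; rw [h3, hu] at h; exact absurd h (by simp)
  · intro hnex
    rcases pbiLastR_aux k L none with ⟨_, heq⟩ | ⟨img, hm, h1, h2, _⟩
    · exact heq
    · exact absurd ⟨img, hm, h1, h2⟩ hnex

theorem pbiLastR_some (L : List (List (String × String))) (k : Nat) (u : String)
    (h : pbiLastR L k = some u) :
    ∃ img ∈ L, pbiTruthy img = true ∧ pbiRank img = k ∧ pbiGet img "url" = some u := by
  rcases pbiLastR_aux k L none with ⟨_, heq⟩ | ⟨img, hm, h1, h2, h3⟩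
  · rw [pbiLastR] at h; rw [heq] at h; exact absurd h (by simp)
  · rw [pbiLastR] at h; rw [h3] at h; exact ⟨img, hm, h1, h2, h.symm ▸ rfl⟩

theorem pbiFirstR_none_iff (L : List (List (String × String))) (k : Nat) :
    pbiFirstR L k = none ↔ ¬ pbiExR L k := by
  induction L with
  | nil => simp [pbiFirstR, pbiExR]
  | cons i rest ih =>
    by_cases hc : pbiTruthy i = true ∧ pbiRank i = k
    · obtain ⟨u, hu, _⟩ := pbiTruthy_url i hc.1
      simp only [pbiFirstR, if_pos hc, hu]
      constructor
      · intro h; exact absurd h (by simp)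
      · intro hnex; exact absurd ⟨i, List.mem_cons_self, hc⟩ hnex
    · simp only [pbiFirstR, if_neg hc]
      rw [ih]
      constructor
      · rintro hnex ⟨img, hm, h1, h2⟩
        rcases List.mem_cons.1 hm with rfl | hm'
        · exact hc ⟨h1, h2⟩
        · exact hnex ⟨img, hm', h1, h2⟩
      · intro hnex hex
        obtain ⟨img, hm, h1, h2⟩ := hex
        exact hnex ⟨img, List.mem_cons_of_mem _ hm, h1, h2⟩

theorem pbiFirstR_some (L : List (List (String × String))) (k : Nat) (u : String) :
    pbiFirstR L k = some u →
    ∃ img ∈ L, pbiTruthy img = true ∧ pbiRank img = k ∧ pbiGet img "url" = some u := by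
  induction L with
  | nil => intro h; exact absurd h (by simp [pbiFirstR])
  | cons i rest ih =>
    intro h
    by_cases hc : pbiTruthy i = true ∧ pbiRank i = k
    · rw [pbiFirstR, if_pos hc] at h
      exact ⟨i, List.mem_cons_self, hc.1, hc.2, h⟩
    · rw [pbiFirstR, if_neg hc] at h
      obtain ⟨img, hm, h1, h2, h3⟩ := ih h
      exact ⟨img, List.mem_cons_of_mem _ hm, h1, h2, h3⟩

-- Pre_ applied to two images sharing a priority type
theorem pbiPre_eq (L : List (List (String × String))) (hPre : Pre_pick_best_image L)
    {a b : List (String × String)} (ha : a ∈ L) (hb : b ∈ L) {k : Nat} (hk : k < 6)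
    (hta : pbiTruthy a = true) (htb : pbiTruthy b = true)
    (hra : pbiRank a = k) (hrb : pbiRank b = k)
    {u v : String} (hua : pbiGet a "url" = some u) (hub : pbiGet b "url" = some v) :
    u = v := by
  obtain ⟨u', hu', hne⟩ := pbiTruthy_url a hta
  obtain ⟨v', hv', hne'⟩ := pbiTruthy_url b htb
  rw [hua] at hu'; rw [hub] at hv'
  obtain rfl : u = u' := by injection hu'
  obtain rfl : v = v' := by injection hv'
  have hka : pbiKey a = some (pbiPrio.getD k "", u) := by
    have hmem := pbiMem_getD k hk
    rw [List.getD_eq_getElem?_getD] at hmem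
    rw [pbiKey, (pbiRank_lt_iff a k hk).1 hra, hua]
    simp [hmem, hne]
  have hkb : pbiKey b = some (pbiPrio.getD k "", v) := by
    have hmem := pbiMem_getD k hk
    rw [List.getD_eq_getElem?_getD] at hmem
    rw [pbiKey, (pbiRank_lt_iff b k hk).1 hrb, hub]
    simp [hmem, hne']
  unfold Pre_pick_best_image at hPre
  rw [List.all_eq_true] at hPre
  have h1 := hPre a ha
  rw [List.all_eq_true] at h1
  have h2 := h1 b hb
  rw [hka, hkb] at h2
  simpa using h2

-- under Pre_, last and first truthy image of a priority rank carry the same url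
theorem pbiLastR_eq_firstR (L : List (List (String × String)))
    (hPre : Pre_pick_best_image L) (k : Nat) (hk : k < 6) :
    pbiLastR L k = pbiFirstR L k := by
  cases hl : pbiLastR L k with
  | none =>
    rw [(pbiFirstR_none_iff L k).2 ((pbiLastR_none_iff L k).1 hl)]
  | some u =>
    cases hf : pbiFirstR L k with
    | none =>
      have := (pbiFirstR_none_iff L k).1 hf
      have := (pbiLastR_none_iff L k).2 this
      rw [this] at hl; exact absurd hl (by simp)
    | some v =>
      obtain ⟨a, hma, ha1, ha2, ha3⟩ := pbiLastR_some L k u hl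
      obtain ⟨b, hmb, hb1, hb2, hb3⟩ := pbiFirstR_some L k v hf
      rw [pbiPre_eq L hPre hma hmb hk ha1 hb1 ha2 hb2 ha3 hb3]

-- A's dict lookup at the k-th priority type is the last-wins rank-k scan
theorem pbi_get_rank (L : List (List (String × String))) (k : Nat) (hk : k < 6) :
    (pbiByType L).get? (some (pbiPrio.getD k "")) = pbiLastR L k := by
  rw [pbiByType, pbiLastR, pbi_get_byType]
  have hfun : (fun (best : Option String) img =>
      match pbiGet img "url" with
      | some u => if pbiGet img "type" = some (pbiPrio.getD k "") ∧ u ≠ "" then some u else best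
      | none => best)
    = (fun (best : Option String) img =>
      if pbiTruthy img = true ∧ pbiRank img = k then pbiGet img "url" else best) := by
    funext best img
    cases hu : pbiGet img "url" with
    | none => simp [pbiTruthy, hu]
    | some u =>
      have htr : pbiTruthy img = (u != "") := by rw [pbiTruthy, hu]
      simp only [htr]
      by_cases hne : u = ""
      · simp [hne]
      · have : pbiRank img = k ↔ pbiGet img "type" = some (pbiPrio.getD k "") :=
          pbiRank_lt_iff img k hk
        by_cases hr : pbiRank img = k
        · simp [hr, this.1 hr, hne]
        · have hnt : ¬ pbiGet img "type" = some (pbiPrio.getD k "") := fun h => hr (this.2 h)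
          rw [List.getD_eq_getElem?_getD] at hnt
          simp [hr, hnt, hne]
  rw [hfun, PySem.Dict.get?_empty]

-- B's fold characterised: first url at the minimal truthy rank below the running bound
theorem pbi_fold_char (L : List (List (String × String))) :
    ∀ (r₀ : Nat) (u₀ : Option String), r₀ ≤ 6 →
    (L.foldl (fun s img =>
        match pbiGet img "url" with
        | none => s
        | some u =>
          if u = "" then s
          else
            match pbiGet img "type" with
            | none => s
            | some t =>
              match PySem.List.index? pbiPrio t with
              | none => s
              | some r => if r < s.1 then (r, some u) else s)
      (r₀, u₀)).2
    = if pbiMr L r₀ < r₀ then pbiFirstR L (pbiMr L r₀) else u₀ := by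
  induction L with
  | nil => intro r₀ u₀ _; simp [pbiMr]
  | cons img rest ih =>
    intro r₀ u₀ hr₀
    rw [List.foldl_cons]
    cases hu : pbiGet img "url" with
    | none =>
      have htr : pbiTruthy img = false := by simp [pbiTruthy, hu]
      have hmr : pbiMr (img :: rest) r₀ = pbiMr rest r₀ := by
        simp [pbiMr, List.foldl_cons, htr]
      have hfr : ∀ m, m < 6 → pbiFirstR (img :: rest) m = pbiFirstR rest m := by
        intro m _; simp [pbiFirstR, htr]
      rw [ih r₀ u₀ hr₀, hmr]
      split
      · next h => rw [hfr _ (lt_of_lt_of_le (lt_of_lt_of_le h hr₀) le_rfl)]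
      · rfl
    | some u =>
      by_cases hne : u = ""
      · have htr : pbiTruthy img = false := by simp [pbiTruthy, hu, hne]
        have hmr : pbiMr (img :: rest) r₀ = pbiMr rest r₀ := by
          simp [pbiMr, List.foldl_cons, htr]
        have hfr : ∀ m, pbiFirstR (img :: rest) m = pbiFirstR rest m := by
          intro m; simp [pbiFirstR, htr]
        simp only [if_pos hne]
        rw [ih r₀ u₀ hr₀, hmr]
        split
        · rw [hfr]
        · rfl
      · have htr : pbiTruthy img = true := by simp [pbiTruthy, hu, hne]
        have hskip6 : pbiRank img = 6 →
            (rest.foldl (fun s img =>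
              match pbiGet img "url" with
              | none => s
              | some u =>
                if u = "" then s
                else
                  match pbiGet img "type" with
                  | none => s
                  | some t =>
                    match PySem.List.index? pbiPrio t with
                    | none => s
                    | some r => if r < s.1 then (r, some u) else s)
              (r₀, u₀)).2
            = if pbiMr (img :: rest) r₀ < r₀ then pbiFirstR (img :: rest) (pbiMr (img :: rest) r₀) else u₀ := by
          intro h6
          have hmr : pbiMr (img :: rest) r₀ = pbiMr rest r₀ := by
            simp [pbiMr, List.foldl_cons, htr, h6, Nat.min_eq_left hr₀]
          have hfr : ∀ m, m < r₀ → pbiFirstR (img :: rest) m = pbiFirstR rest m := by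
            intro m hm
            have : ¬ (pbiTruthy img = true ∧ pbiRank img = m) := by
              rintro ⟨_, hr⟩; omega
            simp [pbiFirstR, this]
          rw [ih r₀ u₀ hr₀, hmr]
          split
          · next h => rw [hfr _ h]
          · rfl
        cases htype : pbiGet img "type" with
        | none =>
          have h6 : pbiRank img = 6 := by simp only [pbiRank, htype]
          simp only [if_neg hne]
          exact hskip6 h6
        | some t =>
          cases hidx : PySem.List.index? pbiPrio t with
          | none =>
            have h6 : pbiRank img = 6 := by simp only [pbiRank, htype, hidx]
            simp only [if_neg hne, hidx]
            exact hskip6 h6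
          | some r =>
            have hrk : pbiRank img = r := by simp only [pbiRank, htype, hidx]
            simp only [if_neg hne, hidx]
            by_cases hlt : r < r₀
            · rw [if_pos hlt]
              have hmr : pbiMr (img :: rest) r₀ = pbiMr rest r := by
                simp [pbiMr, List.foldl_cons, htr, hrk, Nat.min_eq_right (le_of_lt hlt)]
              have hmle : pbiMr rest r ≤ r := pbiMr_le rest r
              rw [ih r (some u) (le_trans (le_of_lt hlt) hr₀), hmr]
              by_cases hmlt : pbiMr rest r < r
              · rw [if_pos hmlt, if_pos (lt_trans hmlt hlt)]
                have : ¬ (pbiTruthy img = true ∧ pbiRank img = pbiMr rest r) := by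
                  rintro ⟨_, h⟩; omega
                rw [pbiFirstR, if_neg this]
              · have heq : pbiMr rest r = r := le_antisymm hmle (le_of_not_gt hmlt)
                rw [if_neg hmlt, heq, if_pos hlt]
                rw [pbiFirstR, if_pos ⟨htr, hrk⟩, hu]
            · rw [if_neg hlt]
              have hmr : pbiMr (img :: rest) r₀ = pbiMr rest r₀ := by
                simp [pbiMr, List.foldl_cons, htr, hrk, Nat.min_eq_left (le_of_not_gt hlt)]
              rw [ih r₀ u₀ hr₀, hmr]
              split
              · next h =>
                have : ¬ (pbiTruthy img = true ∧ pbiRank img = pbiMr rest r₀) := by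
                  rintro ⟨_, hr2⟩
                  have := pbiMr_le rest r₀
                  omega
                rw [pbiFirstR, if_neg this]
              · rfl

-- evaluating A's priority loop once each dict probe is known
theorem pbiFind_char (L : List (List (String × String)))
    (hnone : ∀ k, k < pbiMr L 6 → pbiLastR L k = none)
    (hatt : pbiMr L 6 < 6 → ∃ w, pbiLastR L (pbiMr L 6) = some w) :
    pbiFind (pbiByType L) pbiPrio
    = if _h : pbiMr L 6 < 6 then pbiLastR L (pbiMr L 6) else none := by
  have g0 : (pbiByType L).get? (some "OfferImageTall") = pbiLastR L 0 := pbi_get_rank L 0 (by omega)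
  have g1 : (pbiByType L).get? (some "DieselStoreFrontTall") = pbiLastR L 1 := pbi_get_rank L 1 (by omega)
  have g2 : (pbiByType L).get? (some "VaultClosed") = pbiLastR L 2 := pbi_get_rank L 2 (by omega)
  have g3 : (pbiByType L).get? (some "DieselStoreFrontWide") = pbiLastR L 3 := pbi_get_rank L 3 (by omega)
  have g4 : (pbiByType L).get? (some "OfferImageWide") = pbiLastR L 4 := pbi_get_rank L 4 (by omega)
  have g5 : (pbiByType L).get? (some "Thumbnail") = pbiLastR L 5 := pbi_get_rank L 5 (by omega)
  have hle := pbiMr_le L 6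
  obtain ⟨m, hm⟩ : ∃ m, pbiMr L 6 = m := ⟨_, rfl⟩
  rw [hm] at hnone hle hatt ⊢
  simp only [pbiPrio, pbiFind, g0, g1, g2, g3, g4, g5]
  interval_cases m
  · obtain ⟨w, hw⟩ := hatt (by omega); simp [hw]
  · obtain ⟨w, hw⟩ := hatt (by omega); simp [hnone, hw]
  · obtain ⟨w, hw⟩ := hatt (by omega); simp [hnone, hw]
  · obtain ⟨w, hw⟩ := hatt (by omega); simp [hnone, hw]
  · obtain ⟨w, hw⟩ := hatt (by omega); simp [hnone, hw]
  · obtain ⟨w, hw⟩ := hatt (by omega); simp [hnone, hw]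
  · simp [hnone]

-- ===== VERDICT (by name: the statement is the Claim_ definition above) =====
theorem pick_best_image_spec : Claim_equal_pick_best_image := by
  intro L _ hpre
  unfold Spec_pick_best_image
  cases L with
  | nil => rfl
  | cons img0 rest =>
    have hle := pbiMr_le (img0 :: rest) 6
    have hnone : ∀ k, k < pbiMr (img0 :: rest) 6 → pbiLastR (img0 :: rest) k = none := by
      intro k hk
      refine (pbiLastR_none_iff _ k).2 ?_
      rintro ⟨i, hmem, h1, h2⟩
      have := pbiMr_lb (img0 :: rest) 6 i hmem h1
      omega
    have hB := pbi_fold_char (img0 :: rest) 6 none (by omega)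
    have hatt : pbiMr (img0 :: rest) 6 < 6 → ∃ w, pbiLastR (img0 :: rest) (pbiMr (img0 :: rest) 6) = some w := by
      intro h
      have hex := pbiMr_attained (img0 :: rest) 6 h
      cases heq : pbiLastR (img0 :: rest) (pbiMr (img0 :: rest) 6) with
      | none => exact absurd hex ((pbiLastR_none_iff _ _).1 heq)
      | some w => exact ⟨w, rfl⟩
    have hfind := pbiFind_char (img0 :: rest) hnone hatt
    simp only [pick_best_image, pick_best_image_alt, List.headD_cons, reduceCtorEq, if_false]
    rw [show pbiPrio.length = 6 from rfl, hB, hfind]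
    by_cases hlt : pbiMr (img0 :: rest) 6 < 6
    · have hex := pbiMr_attained (img0 :: rest) 6 hlt
      obtain ⟨w, hw⟩ : ∃ w, pbiLastR (img0 :: rest) (pbiMr (img0 :: rest) 6) = some w := by
        cases heq : pbiLastR (img0 :: rest) (pbiMr (img0 :: rest) 6) with
        | none => exact absurd hex ((pbiLastR_none_iff _ _).1 heq)
        | some w => exact ⟨w, rfl⟩
      have hfirst : pbiFirstR (img0 :: rest) (pbiMr (img0 :: rest) 6) = some w := by
        rw [← pbiLastR_eq_firstR _ hpre _ hlt, hw]
      rw [dif_pos hlt, if_pos hlt, hw, hfirst]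
    · rw [dif_neg hlt, if_neg hlt]
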